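-- pv_equiv track=rewrite | github.com/cmplx-xyttmt/competitive-programming | python/src/atcoder/practice_8/panasonic2020_d.py | get_nxt_strings
-- ===== SOURCE A (Python) =====
-- from collections import  deque
--
-- def get_nxt_strings(string, nxt_ch):
--     nxt_strings = []
--     for i in range(len(string)):
--         if string[i] == '':
--             string[i] = nxt_ch
--             break
--
--     q = deque()
--     q.append((1, string))
--     while q:
--         idx, string = q.popleft()
--         if idx == len(string):
--             nxt_strings.append(string)
--             continue
--         if string[idx] == '':
--             q.append((idx + 1, string))
--             copy = list(string)
--             copy[idx] = nxt_ch
--             q.append((idx + 1, copy))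
--         else:
--             q.append((idx + 1, string))
--
--     return nxt_strings
-- ===== SOURCE B (Python) =====
-- from itertools import product
--
-- def get_nxt_strings(string, nxt_ch):
--     # fill the first empty slot in place (same mutation as the original)
--     for i in range(len(string)):
--         if string[i] == '':
--             string[i] = nxt_ch
--             break
--     free = [i for i in range(len(string)) if i >= 1 and string[i] == '']
--     result = []
--     for combo in product(('', nxt_ch), repeat=len(free)):
--         s = list(string)
--         for idx, val in zip(free, combo):
--             s[idx] = val
--         result.append(s)
--     return result
-- ===== Notes on version B (the rewrite author's own statement) =====
-- stated objective: idiomatic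
-- what changed: A's deque-based breadth-first expansion of partial fillings is replaced by collecting the free (empty) slot indices once and enumerating all assignments directly with itertools.product, copying the base list once per output.
import Mathlib
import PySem

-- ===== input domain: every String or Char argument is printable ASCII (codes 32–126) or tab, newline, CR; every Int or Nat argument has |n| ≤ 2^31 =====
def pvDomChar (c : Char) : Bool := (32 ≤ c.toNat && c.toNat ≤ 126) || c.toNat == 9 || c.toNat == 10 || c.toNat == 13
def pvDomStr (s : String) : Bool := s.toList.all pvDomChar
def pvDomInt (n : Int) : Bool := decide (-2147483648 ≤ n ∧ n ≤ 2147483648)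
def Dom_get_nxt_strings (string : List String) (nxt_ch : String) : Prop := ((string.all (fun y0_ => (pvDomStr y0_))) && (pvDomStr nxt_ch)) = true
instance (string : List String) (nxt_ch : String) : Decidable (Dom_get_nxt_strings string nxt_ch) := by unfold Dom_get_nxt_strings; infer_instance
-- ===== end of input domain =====

-- B replaces A's breadth-first queue enumeration by a direct product over the free
-- (empty) slots: simpler and one pass per output.  Return-value equivalence only:
-- both Pythons mutate `string` in place by filling its first empty slot.

-- ===== PORT A =====
-- A's first loop: set the first '' element to nxt_ch (shared verbatim by B's first loop).
def pvFill (nxt_ch : String) : List String → List String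
  | [] => []
  | s :: t => if s = "" then nxt_ch :: t else s :: pvFill nxt_ch t

-- A's BFS while-loop over the deque; the `none` branch is Python's IndexError
-- (reachable only for string = [], excluded by Pre_).
def pvBfs (nxt_ch : String) (q : List (Nat × List String)) (acc : List (List String)) :
    List (List String) :=
  match q with
  | [] => acc
  | (idx, s) :: rest =>
    if idx = s.length then pvBfs nxt_ch rest (acc ++ [s])
    else
      match h : s[idx]? with
      | none => pvBfs nxt_ch rest acc
      | some v =>
        if v = "" then
          pvBfs nxt_ch (rest ++ [(idx + 1, s), (idx + 1, s.set idx nxt_ch)]) acc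
        else
          pvBfs nxt_ch (rest ++ [(idx + 1, s)]) acc
termination_by (q.map (fun p => 3 ^ (p.2.length + 1 - p.1))).sum
decreasing_by
  · simp
  · simp
  · have hlt : idx < s.length := by
      have := List.getElem?_eq_some_iff.mp h; exact this.1
    have h3 : 0 < 3 ^ (s.length - idx) := pow_pos (by omega : (0:ℕ) < 3) _
    have he : s.length + 1 - idx = (s.length - idx) + 1 := by omega
    simp [List.length_set, he, Nat.pow_succ]
    omega
  · have hlt : idx < s.length := by
      have := List.getElem?_eq_some_iff.mp h; exact this.1
    have h3 : 0 < 3 ^ (s.length - idx) := pow_pos (by omega : (0:ℕ) < 3) _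
    have he : s.length + 1 - idx = (s.length - idx) + 1 := by omega
    simp [he, Nat.pow_succ]
    omega

def get_nxt_strings (string : List String) (nxt_ch : String) : List (List String) :=
  pvBfs nxt_ch [(1, pvFill nxt_ch string)] []

-- ===== PORT B =====
-- itertools.product(('', nxt_ch), repeat=k) in generation order (first factor slowest);
-- ported by hand as the standard recursion — exact for tuples over a 2-element pool.
def pvCombos (nxt_ch : String) : Nat → List (List String)
  | 0 => [[]]
  | k + 1 => ["", nxt_ch].flatMap (fun x => (pvCombos nxt_ch k).map (fun c => x :: c))

def get_nxt_strings_alt (string : List String) (nxt_ch : String) : List (List String) :=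
  let base := pvFill nxt_ch string
  -- [i for i in range(len(string)) if i >= 1 and string[i] == '']  (i always in range)
  let free := (List.range base.length).filter (fun i => decide (1 ≤ i) && (base.getD i "" == ""))
  (pvCombos nxt_ch free.length).map
    (fun combo => (free.zip combo).foldl (fun s p => s.set p.1 p.2) base)

-- ===== PRECONDITION & SPEC =====
-- Pre_ excludes only the empty list, on which A raises IndexError (idx 1 out of range).
def Pre_get_nxt_strings (string : List String) (nxt_ch : String) : Prop := string ≠ []
instance (string : List String) (nxt_ch : String) : Decidable (Pre_get_nxt_strings string nxt_ch) := by
  unfold Pre_get_nxt_strings; infer_instance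

def pvWitness_get_nxt_strings : List String × String := (["a", "", "b"], "x")

def Spec_get_nxt_strings (string : List String) (nxt_ch : String) (out : List (List String)) : Prop :=
  out = get_nxt_strings_alt string nxt_ch
instance (string : List String) (nxt_ch : String) (out : List (List String)) :
    Decidable (Spec_get_nxt_strings string nxt_ch out) := by
  unfold Spec_get_nxt_strings; infer_instance

-- ===== CLAIM (what is proved, stated in full; the proofs are below) =====
def Claim_equal_get_nxt_strings : Prop := ∀ (string : List String) (nxt_ch : String), Dom_get_nxt_strings string nxt_ch → Pre_get_nxt_strings string nxt_ch → Spec_get_nxt_strings string nxt_ch (get_nxt_strings string nxt_ch)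

-- ===== LEMMAS AND PROOFS =====

-- DFS/left-to-right characterisation of the completions of s from position d.
def pvComps (nxt : String) (d : Nat) (s : List String) : List (List String) :=
  if h : d < s.length then
    if s[d] = "" then pvComps nxt (d + 1) s ++ pvComps nxt (d + 1) (s.set d nxt)
    else pvComps nxt (d + 1) s
  else [s]
termination_by s.length - d
decreasing_by
  all_goals (try simp only [List.length_set])
  all_goals omega

-- free (empty) positions of s at indices ≥ d.
def pvFree (d : Nat) (s : List String) : List Nat :=
  if h : d < s.length then (if s[d] = "" then [d] else []) ++ pvFree (d + 1) s
  else []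
termination_by s.length - d

theorem pvBfs_cons_done (nxt : String) (idx : Nat) (s : List String)
    (rest : List (Nat × List String)) (acc : List (List String)) (h : idx = s.length) :
    pvBfs nxt ((idx, s) :: rest) acc = pvBfs nxt rest (acc ++ [s]) := by
  rw [pvBfs.eq_def]; simp [h]

theorem pvBfs_cons_empty (nxt : String) (idx : Nat) (s : List String)
    (rest : List (Nat × List String)) (acc : List (List String))
    (hne : ¬ idx = s.length) (hv : s[idx]? = some "") :
    pvBfs nxt ((idx, s) :: rest) acc =
      pvBfs nxt (rest ++ [(idx + 1, s), (idx + 1, s.set idx nxt)]) acc := by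
  rw [pvBfs.eq_def]
  simp only [hne, if_false]
  split <;> simp_all

theorem pvBfs_cons_filled (nxt : String) (idx : Nat) (s : List String)
    (rest : List (Nat × List String)) (acc : List (List String)) (v : String)
    (hne : ¬ idx = s.length) (hv : s[idx]? = some v) (hv' : ¬ v = "") :
    pvBfs nxt ((idx, s) :: rest) acc = pvBfs nxt (rest ++ [(idx + 1, s)]) acc := by
  rw [pvBfs.eq_def]
  simp only [hne, if_false]
  split <;> simp_all

-- the children a queue entry (d, s) pushes.
def pvKids (nxt : String) (d : Nat) (s : List String) : List (List String) :=
  if s[d]? = some "" then [s, s.set d nxt] else [s]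

theorem pvBfs_done (nxt : String) (n : Nat) :
    ∀ (ss : List (List String)) (acc : List (List String)),
      (∀ s ∈ ss, s.length = n) →
      pvBfs nxt (ss.map (fun s => (n, s))) acc = acc ++ ss := by
  intro ss
  induction ss with
  | nil => intro acc _; rw [pvBfs.eq_def]; simp
  | cons s t ih =>
    intro acc hlen
    have hs : s.length = n := hlen s (by simp)
    rw [List.map_cons, pvBfs_cons_done nxt n s _ acc hs.symm]
    rw [ih (acc ++ [s]) (fun x hx => hlen x (by simp [hx]))]
    simp

theorem pvBfs_expand (nxt : String) (n d : Nat) (hd : d < n) :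
    ∀ (ss : List (List String)) (ts : List (Nat × List String)) (acc : List (List String)),
      (∀ s ∈ ss, s.length = n) →
      pvBfs nxt (ss.map (fun s => (d, s)) ++ ts) acc =
      pvBfs nxt (ts ++ (ss.flatMap (pvKids nxt d)).map (fun s => (d + 1, s))) acc := by
  intro ss
  induction ss with
  | nil => intro ts acc _; simp
  | cons s t ih =>
    intro ts acc hlen
    have hs : s.length = n := hlen s (by simp)
    have hdl : d < s.length := by omega
    have hget : s[d]? = some s[d] := List.getElem?_eq_some_iff.mpr ⟨hdl, rfl⟩
    have hne : ¬ d = s.length := by omega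
    by_cases hempty : s[d] = ""
    · rw [List.map_cons, List.cons_append,
        pvBfs_cons_empty nxt d s _ acc hne (hempty ▸ hget), List.append_assoc,
        ih (ts ++ [(d + 1, s), (d + 1, s.set d nxt)]) acc (fun x hx => hlen x (by simp [hx]))]
      simp [pvKids, hget, hempty]
    · rw [List.map_cons, List.cons_append,
        pvBfs_cons_filled nxt d s _ acc s[d] hne hget hempty, List.append_assoc,
        ih (ts ++ [(d + 1, s)]) acc (fun x hx => hlen x (by simp [hx]))]
      simp [pvKids, hget, hempty]

theorem pvComps_eq_kids (nxt : String) (d : Nat) (s : List String) (hd : d < s.length) :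
    pvComps nxt d s = (pvKids nxt d s).flatMap (pvComps nxt (d + 1)) := by
  have hget : s[d]? = some s[d] := List.getElem?_eq_some_iff.mpr ⟨hd, rfl⟩
  rw [pvComps]
  by_cases hempty : s[d] = "" <;> simp [hd, hempty, pvKids, hget]

theorem pvKids_length (nxt : String) (d : Nat) (s : List String) :
    ∀ x ∈ pvKids nxt d s, x.length = s.length := by
  intro x hx
  unfold pvKids at hx
  split at hx <;> simp_all
  rcases hx with h | h <;> simp [h]

theorem pvBfs_comps (nxt : String) (n : Nat) :
    ∀ (k d : Nat), n = d + k →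
    ∀ (ss : List (List String)) (acc : List (List String)),
      (∀ s ∈ ss, s.length = n) →
      pvBfs nxt (ss.map (fun s => (d, s))) acc = acc ++ ss.flatMap (pvComps nxt d) := by
  intro k
  induction k with
  | zero =>
    intro d hdk ss acc hlen
    have hd : d = n := by omega
    have hcomps : ∀ s ∈ ss, pvComps nxt d s = [s] := by
      intro s hs
      rw [pvComps]
      simp [hlen s hs, hd]
    have : ss.flatMap (pvComps nxt d) = ss := by
      induction ss with
      | nil => simp
      | cons a b ihb =>
        rw [List.flatMap_cons, hcomps a (by simp)]
        rw [ihb (fun x hx => hlen x (by simp [hx])) (fun x hx => hcomps x (by simp [hx]))]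
        simp
    subst hd
    rw [this, pvBfs_done nxt d ss acc hlen]
  | succ k ih =>
    intro d hdk ss acc hlen
    have hd : d < n := by omega
    have := pvBfs_expand nxt n d hd ss [] acc hlen
    simp only [List.append_nil, List.nil_append] at this
    rw [this]
    have hlen' : ∀ s ∈ ss.flatMap (pvKids nxt d), s.length = n := by
      intro x hx
      rcases List.mem_flatMap.mp hx with ⟨s, hs, hxs⟩
      rw [pvKids_length nxt d s x hxs, hlen s hs]
    rw [ih (d + 1) (by omega) (ss.flatMap (pvKids nxt d)) acc hlen']
    rw [List.flatMap_assoc]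
    congr 1
    exact List.flatMap_congr
      (fun s hs => (pvComps_eq_kids nxt d s (by rw [hlen s hs]; omega)).symm)

theorem pvFill_length (ch : String) (l : List String) : (pvFill ch l).length = l.length := by
  induction l with
  | nil => rfl
  | cons x t ih => by_cases h : x = "" <;> simp [pvFill, h, ih]

theorem pvFree_set_of_lt (v : String) :
    ∀ (k d e : Nat) (s : List String), s.length - e ≤ k → d < e →
      pvFree e (s.set d v) = pvFree e s := by
  intro k
  induction k with
  | zero =>
    intro d e s hk hde
    have h1 : ¬ e < (s.set d v).length := by simp only [List.length_set]; omega
    have h2 : ¬ e < s.length := by omega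
    rw [pvFree, dif_neg h1]
    rw [pvFree, dif_neg h2]
  | succ k ih =>
    intro d e s hk hde
    by_cases he : e < s.length
    · have h1 : e < (s.set d v).length := by simp only [List.length_set]; omega
      have hne : d ≠ e := by omega
      rw [pvFree, dif_pos h1]
      conv_rhs => rw [pvFree, dif_pos he]
      rw [List.getElem_set_ne hne h1, ih d (e + 1) s (by omega) (by omega)]
    · have h1 : ¬ e < (s.set d v).length := by simp only [List.length_set]; omega
      rw [pvFree, dif_neg h1]
      rw [pvFree, dif_neg he]

theorem pvComps_product (nxt : String) :
    ∀ (k d : Nat) (s : List String), s.length - d ≤ k →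
      pvComps nxt d s =
        (pvCombos nxt (pvFree d s).length).map
          (fun c => ((pvFree d s).zip c).foldl (fun t p => t.set p.1 p.2) s) := by
  intro k
  induction k with
  | zero =>
    intro d s hk
    have hd : ¬ d < s.length := by omega
    rw [pvComps, dif_neg hd, pvFree, dif_neg hd]
    simp [pvCombos]
  | succ k ih =>
    intro d s hk
    by_cases hd : d < s.length
    · by_cases he : s[d] = ""
      · have IH1 := ih (d + 1) s (by omega)
        have IH2 := ih (d + 1) (s.set d nxt) (by simp only [List.length_set]; omega)
        rw [pvFree_set_of_lt nxt (s.length - (d + 1)) d (d + 1) s (by omega) (by omega)] at IH2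
        rw [pvComps, dif_pos hd, if_pos he]
        conv_rhs => rw [pvFree, dif_pos hd, if_pos he]
        rw [IH1, IH2, List.singleton_append, List.length_cons, pvCombos]
        rw [List.flatMap_cons, List.flatMap_cons, List.flatMap_nil, List.append_nil,
          List.map_append, List.map_map, List.map_map]
        congr 1
        all_goals
          apply List.map_congr_left
          intro c _
          simp only [Function.comp_apply, List.zip_cons_cons, List.foldl_cons]
          try rw [← he, List.set_getElem_self]
      · rw [pvComps, dif_pos hd, if_neg he]
        conv_rhs => rw [pvFree, dif_pos hd, if_neg he]
        rw [List.nil_append]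
        exact ih (d + 1) s (by omega)
    · rw [pvComps, dif_neg hd, pvFree, dif_neg hd]
      simp [pvCombos]

theorem pvFree_range' (s : List String) :
    ∀ (k d : Nat), s.length - d ≤ k →
      pvFree d s =
        (List.range' d (s.length - d)).filter (fun i => s.getD i "" == "") := by
  intro k
  induction k with
  | zero =>
    intro d hk
    have hd : ¬ d < s.length := by omega
    have h0 : s.length - d = 0 := by omega
    rw [pvFree, dif_neg hd, h0]
    simp
  | succ k ih =>
    intro d hk
    by_cases hd : d < s.length
    · have h1 : s.length - d = (s.length - (d + 1)) + 1 := by omega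
      rw [pvFree, dif_pos hd, h1, List.range'_succ, List.filter_cons]
      have hgd : s.getD d "" = s[d] := List.getD_eq_getElem s "" hd
      by_cases he : s[d] = ""
      · have ht : (s.getD d "" == "") = true := by rw [hgd]; simp [he]
        rw [if_pos he, ht, if_pos rfl, ih (d + 1) (by omega), List.singleton_append]
      · have hf : (s.getD d "" == "") = false := by rw [hgd]; simp [he]
        rw [if_neg he, hf, List.nil_append, ih (d + 1) (by omega)]
        simp
    · have h0 : s.length - d = 0 := by omega
      rw [pvFree, dif_neg hd, h0]
      simp

theorem filter_range_one (s : List String) (h : 1 ≤ s.length) :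
    (List.range s.length).filter (fun i => decide (1 ≤ i) && (s.getD i "" == "")) =
      (List.range' 1 (s.length - 1)).filter (fun i => s.getD i "" == "") := by
  have h1 : s.length = ((s.length - 1) + 1) := by omega
  rw [List.range_eq_range', h1, List.range'_succ, List.filter_cons]
  have h0 : (decide (1 ≤ 0) && (s.getD 0 "" == "")) = false := by simp
  rw [h0]
  simp only [Bool.false_eq_true, if_false]
  apply List.filter_congr
  intro i hi
  have : 1 ≤ i := (List.mem_range'_1.mp hi).1
  simp [this]

-- ===== VERDICT (by name: the statement is the Claim_ definition above) =====
theorem get_nxt_strings_spec : Claim_equal_get_nxt_strings := by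
  intro string nxt_ch _ hpre
  unfold Spec_get_nxt_strings get_nxt_strings get_nxt_strings_alt
  have hlen : 1 ≤ (pvFill nxt_ch string).length := by
    rw [pvFill_length]
    cases string with
    | nil => exact absurd rfl hpre
    | cons a t => simp
  set base := pvFill nxt_ch string with hbase
  have hfree : (List.range base.length).filter
      (fun i => decide (1 ≤ i) && (base.getD i "" == "")) = pvFree 1 base := by
    rw [filter_range_one base hlen, ← pvFree_range' base (base.length - 1) 1 (by omega)]
  have hA : pvBfs nxt_ch [(1, base)] [] = pvComps nxt_ch 1 base := by
    have := pvBfs_comps nxt_ch base.length (base.length - 1) 1 (by omega) [base] []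
      (by intro x hx; simp at hx; rw [hx])
    simp only [List.map_cons, List.map_nil, List.flatMap_cons, List.flatMap_nil,
      List.nil_append, List.append_nil] at this
    exact this
  simp only [hfree]
  rw [hA, pvComps_product nxt_ch base.length 1 base (by omega)]
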